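-- pv_equiv track=rewrite | github.com/shaswataddas/CodeChef_Contest_Code | January_Challenge_2021_Division_3.py | isJohnWins
-- ===== SOURCE A (Python) =====
-- def isJohnWins(john, jack, sum_john, sum_jack, c):
--     get_answer = 0
--     if sum_jack < sum_john:
--         return 0
--     else:
--     	while True:
-- 		    #jack_max = max(jack)
-- 		    #john_min = min(john)
-- 		    if jack==[] or john==[]:
-- 		    	break
-- 		    jack_max = jack[0]
-- 		    john_min = john[0]
-- 		    jack.remove(jack_max)
-- 		    john.remove(john_min)
-- 		    diff = jack_max - john_min
-- 		    sum_jack = sum_jack - diff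
-- 		    sum_john = sum_john + diff
-- 		    c+=1
-- 		    if sum_john>sum_jack:
-- 		    	get_answer = 1
-- 		    	break
--     	if get_answer==1:
--     		return c
--     	else:
--     		return -1
-- ===== SOURCE B (Python) =====
-- def isJohnWins(john, jack, sum_john, sum_jack, c):
--     d = sum_jack - sum_john
--     if d < 0:
--         return 0
--     acc = 0
--     for i, (x, y) in enumerate(zip(jack, john)):
--         acc += x - y
--         if 2 * acc > d:
--             return c + i + 1
--     return -1
-- ===== Notes on version B (the rewrite author's own statement) =====
-- stated objective: alternative
-- what changed: B replaces A's destructive loop of list.remove calls and re-computation of both sums with one non-mutating pass over zip(jack, john) keeping a single running transferred total acc, returning as soon as 2*acc exceeds the initial gap.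
import Mathlib
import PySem

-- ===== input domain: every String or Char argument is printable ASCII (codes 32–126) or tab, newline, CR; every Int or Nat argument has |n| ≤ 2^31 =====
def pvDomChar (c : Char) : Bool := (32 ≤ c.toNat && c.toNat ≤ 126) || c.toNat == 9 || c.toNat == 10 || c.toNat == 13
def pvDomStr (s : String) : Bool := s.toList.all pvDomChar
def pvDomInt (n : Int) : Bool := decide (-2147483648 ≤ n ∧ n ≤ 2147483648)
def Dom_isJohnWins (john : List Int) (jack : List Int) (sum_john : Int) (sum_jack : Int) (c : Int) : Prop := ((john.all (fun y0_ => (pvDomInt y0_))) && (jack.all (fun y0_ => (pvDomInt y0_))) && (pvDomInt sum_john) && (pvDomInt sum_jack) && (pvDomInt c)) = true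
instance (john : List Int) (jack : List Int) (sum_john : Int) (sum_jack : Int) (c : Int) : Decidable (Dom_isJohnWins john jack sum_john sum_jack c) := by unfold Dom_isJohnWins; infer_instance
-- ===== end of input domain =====

-- B replaces A's destructive loop of list.remove with one non-mutating pass over
-- zip(jack, john) and a running transferred total (objective: alternative algorithm).
-- A mutates its john/jack arguments in place (remove); the equivalence proved here is
-- about the RETURN value only — B does not mutate.

-- ===== PORT A =====
-- while-True loop of A: each iteration pops the head of both lists
-- (jack.remove(jack[0]) / john.remove(john[0]) remove exactly the first element),
-- moves diff between the sums, increments c; breaks with c when sum_john>sum_jack,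
-- with -1 when either list is empty.
def isJohnWinsLoopA : List Int → List Int → Int → Int → Int → Int
  | jx :: johnRest, kx :: jackRest, sj, sk, c =>
      let diff := kx - jx
      if sj + diff > sk - diff then c + 1
      else isJohnWinsLoopA johnRest jackRest (sj + diff) (sk - diff) (c + 1)
  | _, _, _, _, _ => -1

def isJohnWins (john : List Int) (jack : List Int) (sum_john : Int) (sum_jack : Int) (c : Int) : Int :=
  if sum_jack < sum_john then 0
  else isJohnWinsLoopA john jack sum_john sum_jack c

-- ===== PORT B =====
-- B's for-loop over enumerate(zip(jack, john)) with running total acc.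
def isJohnWinsLoopB : List (Int × Int) → Int → Int → Int → Int → Int
  | [], _, _, _, _ => -1
  | (x, y) :: rest, d, acc, c, i =>
      let acc' := acc + (x - y)
      if 2 * acc' > d then c + i + 1
      else isJohnWinsLoopB rest d acc' c (i + 1)

def isJohnWins_alt (john : List Int) (jack : List Int) (sum_john : Int) (sum_jack : Int) (c : Int) : Int :=
  let d := sum_jack - sum_john
  if d < 0 then 0
  else isJohnWinsLoopB (jack.zip john) d 0 c 0

-- ===== PRECONDITION & SPEC =====
def Spec_isJohnWins (john : List Int) (jack : List Int) (sum_john : Int) (sum_jack : Int) (c : Int) (out : Int) : Prop := out = isJohnWins_alt john jack sum_john sum_jack c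
instance (john : List Int) (jack : List Int) (sum_john : Int) (sum_jack : Int) (c : Int) (out : Int) : Decidable (Spec_isJohnWins john jack sum_john sum_jack c out) := by unfold Spec_isJohnWins; infer_instance

-- ===== CLAIM (what is proved, stated in full; the proofs are below) =====
def Claim_equal_isJohnWins : Prop := ∀ (john : List Int) (jack : List Int) (sum_john : Int) (sum_jack : Int) (c : Int), Dom_isJohnWins john jack sum_john sum_jack c → Spec_isJohnWins john jack sum_john sum_jack c (isJohnWins john jack sum_john sum_jack c)

-- ===== LEMMAS AND PROOFS =====

-- ===== VERDICT (by name: the statement is the Claim_ definition above) =====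
-- shifting the enumerate index into c
theorem loopB_shift (ps : List (Int × Int)) (d acc c i : Int) :
    isJohnWinsLoopB ps d acc c (i + 1) = isJohnWinsLoopB ps d acc (c + 1) i := by
  induction ps generalizing acc i with
  | nil => rfl
  | cons p rest ih =>
      obtain ⟨x, y⟩ := p
      simp only [isJohnWinsLoopB]
      split_ifs with h
      · omega
      · exact ih _ _

-- loop invariant: A's loop state (sj, sk) and B's running total acc are related by
-- sk - sj = (initial gap d) - 2*acc
theorem loop_eq (john jack : List Int) (sj sk c acc : Int) :
    isJohnWinsLoopA john jack sj sk c
      = isJohnWinsLoopB (jack.zip john) (sk - sj + 2 * acc) acc c 0 := by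
  induction jack generalizing john sj sk c acc with
  | nil => cases john <;> rfl
  | cons kx jackRest ih =>
      cases john with
      | nil => rfl
      | cons jx johnRest =>
          simp only [isJohnWinsLoopA, isJohnWinsLoopB, List.zip_cons_cons]
          have hc : (sj + (kx - jx) > sk - (kx - jx)) ↔
              (2 * (acc + (kx - jx)) > sk - sj + 2 * acc) := by omega
          split_ifs with h1 h2 h2
          · omega
          · exact absurd (hc.mp h1) h2
          · exact absurd (hc.mpr h2) h1
          · rw [show (0 : Int) + 1 = 0 + 1 from rfl, loopB_shift]
            have := ih johnRest (sj + (kx - jx)) (sk - (kx - jx)) (c + 1) (acc + (kx - jx))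
            rw [this]
            congr 1
            omega

theorem isJohnWins_spec : Claim_equal_isJohnWins := by
  intro john jack sj sk c _
  unfold Spec_isJohnWins isJohnWins isJohnWins_alt
  show _ = if sk - sj < 0 then (0 : Int) else isJohnWinsLoopB (jack.zip john) (sk - sj) 0 c 0
  by_cases h : sk < sj
  · rw [if_pos h, if_pos (by omega : sk - sj < 0)]
  · rw [if_neg h, if_neg (by omega : ¬ sk - sj < 0)]
    have := loop_eq john jack sj sk c 0
    simpa using this
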